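-- pv_equiv track=rewrite | github.com/22310230A/IA_P2 | Lógica/Aprendizaje Inductivo/0051_Explicaciones_e_Informacion_Relevante.py | explicar
-- ===== SOURCE A (Python) =====
-- def explicar(ejemplos):
--     atributos_relevantes = []
--     claves = list(ejemplos[0].keys())
--     claves.remove('es_fruta')
--
--     for clave in claves:
--         valores_verdaderos = set(e[clave] for e in ejemplos if e['es_fruta'])
--         valores_falsos = set(e[clave] for e in ejemplos if not e['es_fruta'])
--         if not valores_verdaderos.isdisjoint(valores_falsos):
--             continue
--         atributos_relevantes.append(clave)
--
--     return atributos_relevantes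
-- ===== SOURCE B (Python) =====
-- def explicar(ejemplos):
--     claves = list(ejemplos[0].keys())
--     claves.remove('es_fruta')
--     primera = {}        # (clave, valor) -> class of the first example seen with that value
--     conflicto = set()   # claves witnessed with the same value in both classes
--     for e in ejemplos:
--         es = bool(e['es_fruta'])
--         for clave in claves:
--             par = (clave, e[clave])
--             if par not in primera:
--                 primera[par] = es
--             elif primera[par] != es:
--                 conflicto.add(clave)
--     return [clave for clave in claves if clave not in conflicto]
-- ===== Notes on version B (the rewrite author's own statement) =====
-- stated objective: alternative
-- what changed: A builds, for each attribute, the set of its values among fruit examples and among non-fruit examples and tests the two sets for disjointness; B makes one pass over the examples with a single dict keyed by (attribute, value) pairs remembering the FIRST class seen for that pair, adding an attribute to a conflict set as soon as the same value reappears with the other class, and finally keeps the attributes not in the conflict set.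
-- outside the precondition, e.g. on explicar([{'es_fruta': 'x'}, {}]): A returns [], B raises KeyError; on explicar([]): A raises IndexError, B raises IndexError; on explicar([{'es_fruta': 'x', 'c': '1'}, {'es_fruta': 'y'}]): A raises KeyError, B raises KeyError
import Mathlib
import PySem

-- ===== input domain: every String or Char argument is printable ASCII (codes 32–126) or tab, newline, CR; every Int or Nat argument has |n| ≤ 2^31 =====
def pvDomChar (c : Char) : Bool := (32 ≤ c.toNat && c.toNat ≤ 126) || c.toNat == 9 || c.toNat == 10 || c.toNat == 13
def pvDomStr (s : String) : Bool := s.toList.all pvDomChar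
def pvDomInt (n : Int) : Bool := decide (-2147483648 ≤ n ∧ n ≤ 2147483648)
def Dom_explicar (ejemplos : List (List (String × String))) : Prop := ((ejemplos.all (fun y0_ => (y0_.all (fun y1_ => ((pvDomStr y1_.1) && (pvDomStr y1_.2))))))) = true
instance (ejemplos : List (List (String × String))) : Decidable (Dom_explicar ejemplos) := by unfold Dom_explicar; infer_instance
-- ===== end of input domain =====

-- B replaces A's per-attribute pair of value sets and disjointness test by a single online
-- conflict detector: one dict keyed by (attribute, value) remembering the FIRST class seen,
-- and a set of attributes caught with the same value in both classes (objective: alternative).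

-- ===== PORT A =====
-- e[c] (dicts are assoc lists; Dict.ofList is Python's dict(pairs)); missing key = KeyError, excluded by Pre_
def pvVal (e : List (String × String)) (c : String) : String :=
  (PySem.Dict.ofList e).getD c ""
-- truthiness of the string e['es_fruta']
def pvFruity (e : List (String × String)) : Bool :=
  pvVal e "es_fruta" != ""

def explicar (ejemplos : List (List (String × String))) : List String :=
  match PySem.List.pyGet? ejemplos 0 with
  | none => []   -- ejemplos[0]: IndexError, excluded by Pre_
  | some e0 =>
    match PySem.List.remove? (PySem.Dict.ofList e0).keys "es_fruta" with
    | none => []   -- claves.remove('es_fruta'): ValueError, excluded by Pre_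
    | some claves =>
      claves.foldl (fun acc clave =>
        -- 'if not disjoint: continue' then append = append exactly when disjoint
        if PySem.Set.isdisjoint
            (PySem.Set.ofList ((ejemplos.filter (fun e => pvFruity e)).map (fun e => pvVal e clave)))
            (PySem.Set.ofList ((ejemplos.filter (fun e => !pvFruity e)).map (fun e => pvVal e clave)))
        then acc ++ [clave] else acc) []

-- ===== PORT B =====
-- the body of B's inner loop: first class seen for (clave, e[clave]), else conflict check
def pvPaso (e : List (String × String))
    (st : PySem.Dict (String × String) Bool × PySem.Set String) (clave : String) :
    PySem.Dict (String × String) Bool × PySem.Set String :=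
  match st.1.get? (clave, pvVal e clave) with
  | none => (st.1.insert (clave, pvVal e clave) (pvFruity e), st.2)       -- par not in primera
  | some b => if b != pvFruity e then (st.1, PySem.Set.add st.2 clave) else st

def explicar_alt (ejemplos : List (List (String × String))) : List String :=
  match PySem.List.pyGet? ejemplos 0 with
  | none => []   -- ejemplos[0]: IndexError, excluded by Pre_
  | some e0 =>
    match PySem.List.remove? (PySem.Dict.ofList e0).keys "es_fruta" with
    | none => []   -- claves.remove('es_fruta'): ValueError, excluded by Pre_
    | some claves =>
      let st := ejemplos.foldl (fun st e => claves.foldl (pvPaso e) st)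
        (((PySem.Dict.empty : PySem.Dict (String × String) Bool), ([] : PySem.Set String)))
      claves.filter (fun clave => !(PySem.Set.contains st.2 clave))

-- ===== PRECONDITION & SPEC =====
-- Pre_ excludes exactly the inputs where the Python raises (empty list: IndexError; first dict
-- without 'es_fruta': ValueError; a dict lacking one of the first dict's keys: KeyError) —
-- except that when the first dict's ONLY key is 'es_fruta', A returns [] without reading the
-- other dicts while B's single pass reads every e['es_fruta'] and raises KeyError if one is
-- missing; that degenerate ragged case is excluded too.
def Pre_explicar (ejemplos : List (List (String × String))) : Prop :=
  ejemplos ≠ [] ∧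
  "es_fruta" ∈ ejemplos.headI.map Prod.fst ∧
  ∀ e ∈ ejemplos, ∀ k ∈ ejemplos.headI.map Prod.fst, k ∈ e.map Prod.fst
instance (ejemplos : List (List (String × String))) : Decidable (Pre_explicar ejemplos) := by
  unfold Pre_explicar; infer_instance

def pvWitness_explicar : (List (List (String × String))) :=
  [[("es_fruta", "1"), ("color", "rojo")], [("es_fruta", ""), ("color", "verde")]]

def Spec_explicar (ejemplos : List (List (String × String))) (out : List String) : Prop := out = explicar_alt ejemplos
instance (ejemplos : List (List (String × String))) (out : List String) : Decidable (Spec_explicar ejemplos out) := by unfold Spec_explicar; infer_instance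

-- ===== CLAIM (what is proved, stated in full; the proofs are below) =====
def Claim_equal_explicar : Prop := ∀ (ejemplos : List (List (String × String))), Dom_explicar ejemplos → Pre_explicar ejemplos → Spec_explicar ejemplos (explicar ejemplos)

-- ===== LEMMAS AND PROOFS =====

-- class of the first example of P whose value at c is v (what B's dict remembers at (c, v))
def pvFirst (P : List (List (String × String))) (c v : String) : Option Bool :=
  (P.find? (fun e => pvVal e c == v)).map pvFruity

-- attribute c has a conflicting pair of examples in P (what B's conflict set records)
def pvConf (P : List (List (String × String))) (c : String) : Prop :=
  ∃ e ∈ P, ∃ e' ∈ P, pvVal e c = pvVal e' c ∧ pvFruity e ≠ pvFruity e'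

-- one pvPaso at another clave leaves the (c, ·) entries of the dict untouched
theorem pvPaso_get_ne (e : List (String × String))
    (st : PySem.Dict (String × String) Bool × PySem.Set String) (a c v : String) (h : c ≠ a) :
    (pvPaso e st a).1.get? (c, v) = st.1.get? (c, v) := by
  unfold pvPaso
  cases hsc : st.1.get? (a, pvVal e a) with
  | none =>
    simp only
    exact PySem.Dict.get?_insert_of_ne _ _ (by simp [h])
  | some b => dsimp only; split_ifs <;> rfl

-- … and leaves membership of c in the conflict set untouched
theorem pvPaso_mem_ne (e : List (String × String))
    (st : PySem.Dict (String × String) Bool × PySem.Set String) (a c : String) (h : c ≠ a) :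
    (c ∈ (pvPaso e st a).2) ↔ c ∈ st.2 := by
  unfold pvPaso
  cases hsc : st.1.get? (a, pvVal e a) with
  | none => simp
  | some b =>
    dsimp only; split_ifs
    · simpa [PySem.Set.mem_add] using fun hca => absurd hca h
    · rfl

-- the inner fold over claves not containing c leaves c's projection untouched
theorem pvFoldPaso_get_not_mem (e : List (String × String)) (l : List String) (c v : String)
    (h : c ∉ l) (st : PySem.Dict (String × String) Bool × PySem.Set String) :
    (l.foldl (pvPaso e) st).1.get? (c, v) = st.1.get? (c, v) := by
  induction l generalizing st with
  | nil => rfl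
  | cons a t ih =>
    simp only [List.foldl_cons]
    rw [ih (fun hc => h (List.mem_cons_of_mem a hc)),
        pvPaso_get_ne e st a c v (fun hc => h (hc ▸ List.mem_cons_self))]

theorem pvFoldPaso_mem_not_mem (e : List (String × String)) (l : List String) (c : String)
    (h : c ∉ l) (st : PySem.Dict (String × String) Bool × PySem.Set String) :
    (c ∈ (l.foldl (pvPaso e) st).2) ↔ c ∈ st.2 := by
  induction l generalizing st with
  | nil => exact Iff.rfl
  | cons a t ih =>
    simp only [List.foldl_cons]
    rw [ih (fun hc => h (List.mem_cons_of_mem a hc)),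
        pvPaso_mem_ne e st a c (fun hc => h (hc ▸ List.mem_cons_self))]

-- projection of the inner fold at c ∈ l, case "no entry yet at (c, e[c])"
theorem pvFoldPaso_get_none (e : List (String × String)) (l : List String) (c v : String)
    (hnd : l.Nodup) (hc : c ∈ l) (st : PySem.Dict (String × String) Bool × PySem.Set String)
    (hsc : st.1.get? (c, pvVal e c) = none) :
    (l.foldl (pvPaso e) st).1.get? (c, v)
      = if v = pvVal e c then some (pvFruity e) else st.1.get? (c, v) := by
  induction l generalizing st with
  | nil => cases hc
  | cons a t ih =>
    have hat : a ∉ t := (List.nodup_cons.mp hnd).1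
    simp only [List.foldl_cons]
    rcases List.mem_cons.mp hc with rfl | hct
    · rw [pvFoldPaso_get_not_mem e t c v hat]
      unfold pvPaso
      rw [hsc]
      simp only
      rw [PySem.Dict.get?_insert]
      by_cases hv : v = pvVal e c <;> simp [hv, Prod.ext_iff]
    · have hca : c ≠ a := fun h => hat (h ▸ hct)
      rw [ih (List.nodup_cons.mp hnd).2 hct _
            (by rw [pvPaso_get_ne e st a c _ hca]; exact hsc),
          pvPaso_get_ne e st a c v hca]

-- same, case "entry already present": the dict part is unchanged
theorem pvFoldPaso_get_some (e : List (String × String)) (l : List String) (c v : String) (b : Bool)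
    (hnd : l.Nodup) (hc : c ∈ l) (st : PySem.Dict (String × String) Bool × PySem.Set String)
    (hsc : st.1.get? (c, pvVal e c) = some b) :
    (l.foldl (pvPaso e) st).1.get? (c, v) = st.1.get? (c, v) := by
  induction l generalizing st with
  | nil => cases hc
  | cons a t ih =>
    have hat : a ∉ t := (List.nodup_cons.mp hnd).1
    simp only [List.foldl_cons]
    rcases List.mem_cons.mp hc with rfl | hct
    · rw [pvFoldPaso_get_not_mem e t c v hat]
      unfold pvPaso
      rw [hsc]
      dsimp only; split_ifs <;> rfl
    · have hca : c ≠ a := fun h => hat (h ▸ hct)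
      rw [ih (List.nodup_cons.mp hnd).2 hct _
            (by rw [pvPaso_get_ne e st a c _ hca]; exact hsc),
          pvPaso_get_ne e st a c v hca]

-- membership of c in the conflict set after the inner fold, both cases
theorem pvFoldPaso_mem_none (e : List (String × String)) (l : List String) (c : String)
    (hnd : l.Nodup) (hc : c ∈ l) (st : PySem.Dict (String × String) Bool × PySem.Set String)
    (hsc : st.1.get? (c, pvVal e c) = none) :
    ((c ∈ (l.foldl (pvPaso e) st).2) ↔ c ∈ st.2) := by
  induction l generalizing st with
  | nil => cases hc
  | cons a t ih =>
    have hat : a ∉ t := (List.nodup_cons.mp hnd).1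
    simp only [List.foldl_cons]
    rcases List.mem_cons.mp hc with rfl | hct
    · rw [pvFoldPaso_mem_not_mem e t c hat]
      unfold pvPaso
      rw [hsc]
    · have hca : c ≠ a := fun h => hat (h ▸ hct)
      rw [ih (List.nodup_cons.mp hnd).2 hct _
            (by rw [pvPaso_get_ne e st a c _ hca]; exact hsc),
          pvPaso_mem_ne e st a c hca]

theorem pvFoldPaso_mem_some (e : List (String × String)) (l : List String) (c : String) (b : Bool)
    (hnd : l.Nodup) (hc : c ∈ l) (st : PySem.Dict (String × String) Bool × PySem.Set String)
    (hsc : st.1.get? (c, pvVal e c) = some b) :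
    ((c ∈ (l.foldl (pvPaso e) st).2) ↔ (b ≠ pvFruity e ∨ c ∈ st.2)) := by
  induction l generalizing st with
  | nil => cases hc
  | cons a t ih =>
    have hat : a ∉ t := (List.nodup_cons.mp hnd).1
    simp only [List.foldl_cons]
    rcases List.mem_cons.mp hc with rfl | hct
    · rw [pvFoldPaso_mem_not_mem e t c hat]
      unfold pvPaso
      rw [hsc]
      dsimp only
      by_cases hb : b = pvFruity e
      · simp [hb]
      · simp [bne_iff_ne, hb, PySem.Set.mem_add]
    · have hca : c ≠ a := fun h => hat (h ▸ hct)
      rw [ih (List.nodup_cons.mp hnd).2 hct _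
            (by rw [pvPaso_get_ne e st a c _ hca]; exact hsc),
          pvPaso_mem_ne e st a c hca]

-- one example step preserves the invariant at every c ∈ claves
theorem pvStep_inv (claves : List String) (hnd : claves.Nodup) (c : String) (hc : c ∈ claves)
    (e : List (String × String)) (P : List (List (String × String)))
    (st : PySem.Dict (String × String) Bool × PySem.Set String)
    (hget : ∀ v, st.1.get? (c, v) = pvFirst P c v)
    (hmem : (c ∈ st.2) ↔ pvConf P c) :
    (∀ v, (claves.foldl (pvPaso e) st).1.get? (c, v) = pvFirst (P ++ [e]) c v) ∧
    ((c ∈ (claves.foldl (pvPaso e) st).2) ↔ pvConf (P ++ [e]) c) := by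
  cases hsc : st.1.get? (c, pvVal e c) with
  | none =>
    have hfind : P.find? (fun e' => pvVal e' c == pvVal e c) = none := by
      have := (hget (pvVal e c)).symm.trans hsc
      unfold pvFirst at this
      exact Option.map_eq_none_iff.mp this
    have hno : ∀ e' ∈ P, pvVal e' c ≠ pvVal e c := by
      intro e' he'
      have := List.find?_eq_none.mp hfind e' he'
      simpa using this
    constructor
    · intro v
      rw [pvFoldPaso_get_none e claves c v hnd hc st hsc]
      unfold pvFirst
      rw [List.find?_append]
      by_cases hv : v = pvVal e c
      · subst hv
        rw [hfind]
        simp [List.find?]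
      · have hne : (pvVal e c == v) = false := beq_eq_false_iff_ne.mpr (Ne.symm hv)
        simp [List.find?, hne, hv, hget v, pvFirst]
    · rw [pvFoldPaso_mem_none e claves c hnd hc st hsc, hmem]
      constructor
      · rintro ⟨e1, h1, e2, h2, hv, hf⟩
        exact ⟨e1, List.mem_append_left _ h1, e2, List.mem_append_left _ h2, hv, hf⟩
      · rintro ⟨e1, h1, e2, h2, hv, hf⟩
        rcases List.mem_append.mp h1 with h1 | h1 <;> rcases List.mem_append.mp h2 with h2 | h2
        · exact ⟨e1, h1, e2, h2, hv, hf⟩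
        · exact absurd (List.mem_singleton.mp h2 ▸ hv) (hno e1 h1)
        · exact absurd (List.mem_singleton.mp h1 ▸ hv).symm (hno e2 h2)
        · exact absurd (List.mem_singleton.mp h1 ▸ List.mem_singleton.mp h2 ▸ rfl) hf
  | some b =>
    obtain ⟨e0, hf0, hb0⟩ : ∃ e0, P.find? (fun e' => pvVal e' c == pvVal e c) = some e0 ∧ pvFruity e0 = b := by
      have := (hget (pvVal e c)).symm.trans hsc
      unfold pvFirst at this
      obtain ⟨e0, h1, h2⟩ := Option.map_eq_some_iff.mp this
      exact ⟨e0, h1, h2⟩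
    have he0P : e0 ∈ P := List.mem_of_find?_eq_some hf0
    have he0v : pvVal e0 c = pvVal e c := by
      have := List.find?_some hf0
      simpa using this
    constructor
    · intro v
      rw [pvFoldPaso_get_some e claves c v b hnd hc st hsc, hget v]
      unfold pvFirst
      rw [List.find?_append]
      cases hv : P.find? (fun e' => pvVal e' c == v) with
      | some x => simp
      | none =>
        have hvne : v ≠ pvVal e c := by
          intro h; subst h; rw [hv] at hf0; cases hf0
        have hne : (pvVal e c == v) = false := beq_eq_false_iff_ne.mpr (Ne.symm hvne)
        simp [List.find?, hne]
    · rw [pvFoldPaso_mem_some e claves c b hnd hc st hsc, hmem]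
      constructor
      · rintro (hne | hconf)
        · exact ⟨e0, List.mem_append_left _ he0P, e,
            List.mem_append_right _ (List.mem_singleton.mpr rfl), he0v,
            by rw [hb0]; exact hne⟩
        · obtain ⟨e1, h1, e2, h2, hv, hf⟩ := hconf
          exact ⟨e1, List.mem_append_left _ h1, e2, List.mem_append_left _ h2, hv, hf⟩
      · rintro ⟨e1, h1, e2, h2, hv, hf⟩
        by_cases hb : b = pvFruity e
        · right
          rcases List.mem_append.mp h1 with h1P | h1e <;> rcases List.mem_append.mp h2 with h2P | h2e
          · exact ⟨e1, h1P, e2, h2P, hv, hf⟩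
          · rw [List.mem_singleton.mp h2e] at hv hf
            refine ⟨e0, he0P, e1, h1P, by rw [he0v, hv], ?_⟩
            rw [hb0, hb]
            exact Ne.symm hf
          · rw [List.mem_singleton.mp h1e] at hv hf
            refine ⟨e0, he0P, e2, h2P, by rw [he0v, ← hv], ?_⟩
            rw [hb0, hb]
            exact hf
          · rw [List.mem_singleton.mp h1e, List.mem_singleton.mp h2e] at hf
            exact absurd rfl hf
        · exact Or.inl hb

-- the full pass over the examples establishes the invariant
theorem pvFold_inv (claves : List String) (hnd : claves.Nodup) (c : String) (hc : c ∈ claves)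
    (l P : List (List (String × String)))
    (st : PySem.Dict (String × String) Bool × PySem.Set String)
    (hget : ∀ v, st.1.get? (c, v) = pvFirst P c v)
    (hmem : (c ∈ st.2) ↔ pvConf P c) :
    (∀ v, (l.foldl (fun st e => claves.foldl (pvPaso e) st) st).1.get? (c, v) = pvFirst (P ++ l) c v) ∧
    ((c ∈ (l.foldl (fun st e => claves.foldl (pvPaso e) st) st).2) ↔ pvConf (P ++ l) c) := by
  induction l generalizing P st with
  | nil => simpa using ⟨hget, hmem⟩
  | cons e t ih =>
    obtain ⟨hget', hmem'⟩ := pvStep_inv claves hnd c hc e P st hget hmem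
    simp only [List.foldl_cons]
    rw [List.append_cons]
    exact ih (P ++ [e]) _ hget' hmem'

-- c is conflicted in ejemplos iff A's two value sets intersect
theorem pvConf_iff_not_disjoint (ejemplos : List (List (String × String))) (c : String) :
    pvConf ejemplos c ↔
    ¬ (PySem.Set.isdisjoint
        (PySem.Set.ofList ((ejemplos.filter (fun e => pvFruity e)).map (fun e => pvVal e c)))
        (PySem.Set.ofList ((ejemplos.filter (fun e => !pvFruity e)).map (fun e => pvVal e c))) = true) := by
  rw [PySem.Set.isdisjoint_iff]
  simp only [PySem.Set.mem_ofList, List.mem_map, List.mem_filter, not_forall, not_not,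
    exists_prop]
  constructor
  · rintro ⟨e1, h1, e2, h2, hv, hf⟩
    cases hb1 : pvFruity e1 with
    | true =>
      refine ⟨pvVal e1 c, ⟨e1, ⟨h1, hb1⟩, rfl⟩, ⟨e2, ⟨h2, ?_⟩, hv.symm⟩⟩
      cases hb2 : pvFruity e2
      · simp
      · exact absurd (hb1.trans hb2.symm) hf
    | false =>
      refine ⟨pvVal e1 c, ⟨e2, ⟨h2, ?_⟩, hv.symm⟩, ⟨e1, ⟨h1, by simp [hb1]⟩, rfl⟩⟩
      cases hb2 : pvFruity e2
      · exact absurd (hb1.trans hb2.symm) hf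
      · rfl
  · rintro ⟨v, ⟨e1, ⟨h1, hb1⟩, rfl⟩, e2, ⟨h2, hb2⟩, hv⟩
    refine ⟨e1, h1, e2, h2, hv.symm, ?_⟩
    rw [hb1]
    simp only [Bool.not_eq_true'] at hb2
    rw [hb2]
    decide

-- claves (keys minus 'es_fruta') has no duplicates
theorem pv_claves_nodup (e0 : List (String × String)) (claves : List String)
    (h : PySem.List.remove? (PySem.Dict.ofList e0).keys "es_fruta" = some claves) :
    claves.Nodup := by
  unfold PySem.List.remove? at h
  cases hk : List.idxOf? "es_fruta" (PySem.Dict.ofList e0).keys with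
  | none => rw [hk] at h; cases h
  | some k =>
    rw [hk] at h
    simp only [Option.map_some, Option.some.injEq] at h
    exact List.Nodup.sublist (h ▸ List.eraseIdx_sublist _ k) (PySem.Dict.nodup_keys_ofList e0)

-- ===== VERDICT (by name: the statement is the Claim_ definition above) =====
theorem explicar_spec : Claim_equal_explicar := by
  intro ejemplos _ _
  unfold Spec_explicar explicar explicar_alt
  cases h0 : PySem.List.pyGet? ejemplos 0 with
  | none => rfl
  | some e0 =>
    dsimp only
    cases hr : PySem.List.remove? (PySem.Dict.ofList e0).keys "es_fruta" with
    | none => rfl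
    | some claves =>
      have hnd := pv_claves_nodup e0 claves hr
      dsimp only
      rw [PySem.List.foldl_append_if_eq_filter
            (fun clave => PySem.Set.isdisjoint
              (PySem.Set.ofList ((ejemplos.filter (fun e => pvFruity e)).map (fun e => pvVal e clave)))
              (PySem.Set.ofList ((ejemplos.filter (fun e => !pvFruity e)).map (fun e => pvVal e clave)))) claves []]
      rw [List.nil_append]
      refine List.filter_congr (fun c hc => ?_)
      have hinv := pvFold_inv claves hnd c hc ejemplos []
        (((PySem.Dict.empty : PySem.Dict (String × String) Bool), ([] : PySem.Set String)))
        (fun v => rfl) (by simp [pvConf])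
      rw [List.nil_append] at hinv
      rw [Bool.eq_iff_iff]
      constructor
      · intro hdisj
        have hnc : ¬ pvConf ejemplos c := fun h => (pvConf_iff_not_disjoint ejemplos c).mp h hdisj
        simp only [Bool.not_eq_true']
        cases hcon : PySem.Set.contains _ c
        · rfl
        · exact absurd (hinv.2.mp ((PySem.Set.contains_iff _ _).mp hcon)) hnc
      · intro hncon
        by_contra hdisj
        have hconf : pvConf ejemplos c := (pvConf_iff_not_disjoint ejemplos c).mpr
          (by simpa using hdisj)
        have : PySem.Set.contains _ c = true := (PySem.Set.contains_iff _ _).mpr (hinv.2.mpr hconf)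
        rw [this] at hncon
        cases hncon
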